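-- pv_equiv track=rewrite | github.com/ConvLab/ConvLab-3 | convlab/policy/tus/multiwoz/Goal.py | _reorder_based_on_user_history
-- ===== SOURCE A (Python) =====
-- def _reorder_based_on_user_history(user_history, goal_slot):
--     # user_history = [slot_0, slot_1, ...]
--     new_order = []
--     for slot in user_history:
--         if slot and slot not in new_order:
--             new_order.append(slot)
--
--     for slot in goal_slot:
--         if slot not in new_order:
--             new_order.append(slot)
--     return new_order
-- ===== SOURCE B (Python) =====
-- def _reorder_based_on_user_history(user_history, goal_slot):
--     # Remove-ahead recursion: keep the head, delete its later copies from the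
--     # remaining input, recurse. No 'seen' structure and no membership test
--     # against the output is ever needed.
--     def dedup(xs):
--         if not xs:
--             return []
--         head = xs[0]
--         return [head] + dedup([y for y in xs[1:] if y != head])
--     return dedup([s for s in user_history if s] + list(goal_slot))
-- ===== Notes on version B (the rewrite author's own statement) =====
-- stated objective: alternative
-- what changed: Replaced the two membership-testing append loops (which check each slot against the growing output) by a remove-ahead recursion: keep the head of the merged input and recursively dedup the tail with the head's later copies filtered out, so no seen-set or output membership test exists.
import Mathlib
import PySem

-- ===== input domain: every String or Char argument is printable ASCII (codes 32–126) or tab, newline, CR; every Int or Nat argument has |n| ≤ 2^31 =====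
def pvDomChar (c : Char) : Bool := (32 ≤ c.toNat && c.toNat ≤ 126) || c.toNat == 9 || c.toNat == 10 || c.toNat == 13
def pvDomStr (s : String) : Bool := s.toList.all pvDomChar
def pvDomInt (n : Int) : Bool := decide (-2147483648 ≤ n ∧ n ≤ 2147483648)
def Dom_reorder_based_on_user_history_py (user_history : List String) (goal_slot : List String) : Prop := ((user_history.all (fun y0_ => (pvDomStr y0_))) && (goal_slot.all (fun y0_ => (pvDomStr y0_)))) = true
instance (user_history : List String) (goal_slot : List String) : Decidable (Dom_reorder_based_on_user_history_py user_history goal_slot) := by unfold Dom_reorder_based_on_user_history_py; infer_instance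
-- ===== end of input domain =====

-- B replaces the output-membership append loops by a remove-ahead recursion (alternative decomposition, same result).
-- ===== PORT A =====
def reorder_based_on_user_history_py (user_history : List String) (goal_slot : List String) : List String :=
  let new_order := user_history.foldl
    (fun new_order slot =>
      if slot ≠ "" ∧ slot ∉ new_order then new_order ++ [slot] else new_order) []
  goal_slot.foldl
    (fun new_order slot =>
      if slot ∉ new_order then new_order ++ [slot] else new_order) new_order

-- ===== PORT B =====
-- remove-ahead dedup: keep the head, recurse on the tail with the head's copies filtered out
def pvDedupAhead (xs : List String) : List String :=
  match xs with
  | [] => []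
  | h :: t => h :: pvDedupAhead (t.filter (fun y => y ≠ h))
termination_by xs.length
decreasing_by simp; exact (List.length_filter_le _ _).trans (by simp)

def reorder_based_on_user_history_py_alt (user_history : List String) (goal_slot : List String) : List String :=
  pvDedupAhead ((user_history.filter (fun s => s ≠ "")) ++ goal_slot)

-- ===== PRECONDITION & SPEC =====
def Spec_reorder_based_on_user_history_py (user_history : List String) (goal_slot : List String) (out : List String) : Prop := out = reorder_based_on_user_history_py_alt user_history goal_slot
instance (user_history : List String) (goal_slot : List String) (out : List String) : Decidable (Spec_reorder_based_on_user_history_py user_history goal_slot out) := by unfold Spec_reorder_based_on_user_history_py; infer_instance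

-- ===== CLAIM (what is proved, stated in full; the proofs are below) =====
def Claim_equal_reorder_based_on_user_history_py : Prop := ∀ (user_history : List String) (goal_slot : List String), Dom_reorder_based_on_user_history_py user_history goal_slot → Spec_reorder_based_on_user_history_py user_history goal_slot (reorder_based_on_user_history_py user_history goal_slot)

-- ===== LEMMAS AND PROOFS =====

theorem pvDedupAhead_nil : pvDedupAhead [] = [] := by
  simp [pvDedupAhead]

theorem pvDedupAhead_cons (h : String) (t : List String) :
    pvDedupAhead (h :: t) = h :: pvDedupAhead (t.filter (fun y => y ≠ h)) := by
  simp [pvDedupAhead]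

theorem foldl_notMem_eq_dedupAhead (xs : List String) (acc : List String) :
    xs.foldl (fun a s => if s ∉ a then a ++ [s] else a) acc
      = acc ++ pvDedupAhead (xs.filter (fun y => y ∉ acc)) := by
  induction xs generalizing acc with
  | nil => simp [pvDedupAhead_nil]
  | cons x t ih =>
      by_cases hx : x ∈ acc
      · rw [List.foldl_cons, if_neg (not_not_intro hx)]
        simp only [List.filter_cons, decide_eq_true_eq]
        rw [if_neg (not_not_intro hx)]
        exact ih acc
      · have hf : t.filter (fun y => decide (y ∉ acc ++ [x]))
            = (t.filter (fun y => decide (y ∉ acc))).filter (fun y => decide (y ≠ x)) := by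
          rw [List.filter_filter]
          apply List.filter_congr
          intro y _
          by_cases h1 : y ∈ acc <;> by_cases h2 : y = x <;> simp [h1, h2, List.mem_append]
        rw [List.foldl_cons, if_pos hx, ih (acc ++ [x]), hf]
        have hc : (x :: t).filter (fun y => decide (y ∉ acc)) = x :: t.filter (fun y => decide (y ∉ acc)) := by
          simp [hx]
        rw [hc, pvDedupAhead_cons]
        simp

theorem foldl_truthy_eq_foldl_filter (xs : List String) (acc : List String) :
    xs.foldl (fun a s => if s ≠ "" ∧ s ∉ a then a ++ [s] else a) acc
      = (xs.filter (fun s => s ≠ "")).foldl (fun a s => if s ∉ a then a ++ [s] else a) acc := by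
  induction xs generalizing acc with
  | nil => rfl
  | cons x t ih =>
      by_cases hx : x = ""
      · simp [hx, ih]
      · by_cases hm : x ∈ acc <;> simp [hx, hm, ih]

-- ===== VERDICT (by name: the statement is the Claim_ definition above) =====
theorem reorder_based_on_user_history_py_spec : Claim_equal_reorder_based_on_user_history_py := by
  intro uh gs _
  unfold Spec_reorder_based_on_user_history_py reorder_based_on_user_history_py
    reorder_based_on_user_history_py_alt
  rw [foldl_truthy_eq_foldl_filter, ← List.foldl_append, foldl_notMem_eq_dedupAhead]
  simp
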